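-- pv_equiv track=rewrite | github.com/jpbot/adventofcode | 2020/day14.py | increment_by_mask
-- ===== SOURCE A (Python) =====
-- def increment_by_mask(addr, mask, bits = 36):
--     a = format(addr, "036b")
--     i = bits
--     carry = 1
--
--     while(carry == 1):
--         i = mask.rfind("1", 0, i)
--         if(i == -1):
--             return -1
--         if(a[i] == '1'):
--             carry = 1
--             a = a[:i] + '0' + a[i+1:]
--         else:
--             carry = 0
--             a = a[:i] + '1' + a[i+1:]
--
--     return int(a,2)
-- ===== SOURCE B (Python) =====
-- def increment_by_mask(addr, mask, bits=36):
--     # Extract the number formed by a's bits at the mask's '1' positions,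
--     # add 1 once, and write its bits back (instead of A's char-by-char carry loop).
--     a = format(addr, "036b")
--     pos = [i for i, c in enumerate(mask[:bits]) if c == '1']
--     n = len(pos)
--     v = 0
--     for i in pos:
--         v = 2 * v + (1 if a[i] == '1' else 0)
--     w = v + 1
--     if w == 1 << n:
--         return -1
--     chars = list(a)
--     for i in reversed(pos):
--         chars[i] = '1' if w % 2 == 1 else '0'
--         w //= 2
--     return int(''.join(chars), 2)
-- ===== Notes on version B (the rewrite author's own statement) =====
-- stated objective: alternative
-- what changed: B extracts the integer formed by a's bits at the mask's '1' positions, adds 1 once, and writes the n bits of the sum back MSB-first, replacing A's right-to-left per-character carry-propagation loop over repeated str.rfind calls.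
-- outside the precondition, e.g. on increment_by_mask(-2, '111111111111111111111111111111111111', 36): A returns -3, B returns 3; on increment_by_mask(3, '0000000000000000000000000000000000001', 40): A raises IndexError, B raises IndexError
import Mathlib
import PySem

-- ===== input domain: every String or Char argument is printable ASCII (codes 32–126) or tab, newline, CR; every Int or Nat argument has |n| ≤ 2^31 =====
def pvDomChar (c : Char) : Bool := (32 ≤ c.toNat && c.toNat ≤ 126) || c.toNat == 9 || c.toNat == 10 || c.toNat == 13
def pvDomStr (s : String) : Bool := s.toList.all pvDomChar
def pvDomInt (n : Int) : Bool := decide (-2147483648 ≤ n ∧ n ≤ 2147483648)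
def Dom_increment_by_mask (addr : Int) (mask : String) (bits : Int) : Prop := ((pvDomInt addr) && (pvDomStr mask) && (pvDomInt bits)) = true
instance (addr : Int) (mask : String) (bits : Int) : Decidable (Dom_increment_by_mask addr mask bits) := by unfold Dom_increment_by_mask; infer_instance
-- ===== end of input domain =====

-- B replaces A's char-by-char carry-propagation loop (repeated str.rfind) by extracting the
-- integer formed by a's bits at the mask's '1' positions, adding 1 once, and writing the bits back.

-- ===== shared faithful helpers (format(addr,'036b'), int(s,2)) =====

-- binary digits of n, MSB first ([] for 0) — the digit string format(n,'b') builds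
def natBin : Nat → List Char
  | 0 => []
  | n + 1 => natBin ((n + 1) / 2) ++ [if (n + 1) % 2 = 1 then '1' else '0']
  decreasing_by exact Nat.div_lt_self (Nat.succ_pos n) (by norm_num)

def fmtDigits (n : Nat) : List Char := if n = 0 then ['0'] else natBin n

-- format(addr, "036b"): zero-pad to total width 36, sign character included for addr < 0
def pad36 (addr : Int) : List Char :=
  if addr < 0 then
    '-' :: (List.replicate (35 - (fmtDigits addr.natAbs).length) '0' ++ fmtDigits addr.natAbs)
  else
    List.replicate (36 - (fmtDigits addr.natAbs).length) '0' ++ fmtDigits addr.natAbs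

def binVal (cs : List Char) : Int := cs.foldl (fun acc c => 2 * acc + (if c = '1' then 1 else 0)) 0

-- int(s, 2); exact on an optional '-' followed by binary digits (the only strings reaching it here)
def intOfBin (cs : List Char) : Int := if cs.headD ' ' = '-' then -(binVal cs.tail) else binVal cs

-- ===== PORT A =====

-- mask.rfind("1", 0, e) for an already-clamped end e : Nat (the Int end is clamped by
-- PySem.List.clampIdx at the call site, Python's rfind end rule)
def rfind1 (m : List Char) : Nat → Option Nat
  | 0 => none
  | e + 1 => if m.getD e '?' = '1' then some e else rfind1 m e

theorem rfind1_lt (m : List Char) : ∀ {e p : Nat}, rfind1 m e = some p → p < e := by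
  intro e
  induction e with
  | zero => intro p h; simp [rfind1] at h
  | succ e ih =>
    intro p h
    rw [rfind1] at h
    split at h
    · cases h; omega
    · exact Nat.lt_trans (ih h) (Nat.lt_succ_self e)

-- A's while loop; a[i] is read with getD (in range on Pre_), the two string surgeries are List.set
def loopA (m a : List Char) (e : Nat) : Int :=
  match h : rfind1 m e with
  | none => -1
  | some p =>
    if a.getD p ' ' = '1' then loopA m (a.set p '0') p
    else intOfBin (a.set p '1')
  termination_by e
  decreasing_by exact rfind1_lt m h

def increment_by_mask (addr : Int) (mask : String) (bits : Int) : Int :=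
  loopA mask.toList (pad36 addr) (PySem.List.clampIdx mask.toList.length bits)

-- ===== PORT B =====

def increment_by_mask_alt (addr : Int) (mask : String) (bits : Int) : Int :=
  let a := pad36 addr
  let pos : List Int :=
    (PySem.List.enumerate (PySem.List.slice mask.toList none (some bits))).filterMap
      (fun ic => if ic.2 = '1' then some ic.1 else none)
  let n := pos.length
  let v : Int := pos.foldl (fun acc i => 2 * acc + (if PySem.List.pyGetD a i ' ' = '1' then 1 else 0)) 0
  let w := v + 1
  if w = 2 ^ n then -1
  else
    intOfBin
      ((pos.reverse.foldl
          (fun (st : List Char × Int) i =>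
            (st.1.set i.toNat (if PySem.Int.mod st.2 2 = 1 then '1' else '0'),
             PySem.Int.floordiv st.2 2))
          (a, w)).1)

-- ===== PRECONDITION & SPEC =====

-- Pre_ excludes inputs where some reachable '1' of the mask (index < the clamped end mask[:bits])
-- indexes past the 36-character field — there A raises IndexError — or indexes the sign character
-- of a negative addr, where A's treatment of '-' as a bit is an accident of its string surgery.
def Pre_increment_by_mask (addr : Int) (mask : String) (bits : Int) : Prop :=
  ∀ p < PySem.List.clampIdx mask.toList.length bits,
    mask.toList.getD p '?' = '1' → p < 36 ∧ (addr < 0 → p ≠ 0)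

instance (addr : Int) (mask : String) (bits : Int) : Decidable (Pre_increment_by_mask addr mask bits) := by
  unfold Pre_increment_by_mask; infer_instance

def pvWitness_increment_by_mask : Int × String × Int := (5, "1X1", 36)

def Spec_increment_by_mask (addr : Int) (mask : String) (bits : Int) (out : Int) : Prop := out = increment_by_mask_alt addr mask bits
instance (addr : Int) (mask : String) (bits : Int) (out : Int) : Decidable (Spec_increment_by_mask addr mask bits out) := by
  unfold Spec_increment_by_mask; infer_instance

-- ===== CLAIM (what is proved, stated in full; the proofs are below) =====
def Claim_equal_increment_by_mask : Prop := ∀ (addr : Int) (mask : String) (bits : Int), Dom_increment_by_mask addr mask bits → Pre_increment_by_mask addr mask bits → Spec_increment_by_mask addr mask bits (increment_by_mask addr mask bits)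

-- ===== LEMMAS AND PROOFS =====

-- the '1'-positions of m below e, in increasing order
def poss (m : List Char) (e : Nat) : List Nat :=
  (List.range e).filter (fun p => m.getD p '?' = '1')

def readv (a : List Char) (ps : List Nat) : Int :=
  ps.foldl (fun acc i => 2 * acc + (if a.getD i ' ' = '1' then 1 else 0)) 0

def wbStep (st : List Char × Int) (i : Nat) : List Char × Int :=
  (st.1.set i (if PySem.Int.mod st.2 2 = 1 then '1' else '0'), PySem.Int.floordiv st.2 2)

def wb (a : List Char) (w : Int) (ps : List Nat) : List Char := (ps.foldl wbStep (a, w)).1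

-- what B computes, at the Nat-position level
def Bres (a : List Char) (ps : List Nat) : Int :=
  if readv a ps + 1 = 2 ^ ps.length then -1
  else intOfBin (wb a (readv a ps + 1) ps.reverse)

theorem poss_succ (m : List Char) (e : Nat) :
    poss m (e + 1) = poss m e ++ (if m.getD e '?' = '1' then [e] else []) := by
  simp [poss, List.range_succ, List.filter_append]; split <;> simp_all

theorem mem_poss {m : List Char} {e p : Nat} :
    p ∈ poss m e ↔ p < e ∧ m.getD p '?' = '1' := by
  simp [poss, List.mem_filter]

theorem rfind1_none_poss {m : List Char} {e : Nat} (h : rfind1 m e = none) : poss m e = [] := by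
  induction e with
  | zero => simp [poss]
  | succ e ih =>
    rw [rfind1] at h; split at h
    · cases h
    · rw [poss_succ, ih h]; simp_all

theorem rfind1_some_poss {m : List Char} {e p : Nat} (h : rfind1 m e = some p) :
    poss m e = poss m p ++ [p] := by
  induction e with
  | zero => simp [rfind1] at h
  | succ e ih =>
    rw [rfind1] at h; split at h
    · cases h; rw [poss_succ]; simp_all
    · rw [poss_succ, ih h]; simp_all

theorem readv_append_singleton (a : List Char) (ps : List Nat) (p : Nat) :
    readv a (ps ++ [p]) = 2 * readv a ps + (if a.getD p ' ' = '1' then 1 else 0) := by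
  simp [readv]

theorem readv_from_congr (a b : List Char) (ps : List Nat) : ∀ (acc : Int),
    (∀ q ∈ ps, a.getD q ' ' = b.getD q ' ') →
    ps.foldl (fun acc i => 2 * acc + (if a.getD i ' ' = '1' then 1 else 0)) acc
      = ps.foldl (fun acc i => 2 * acc + (if b.getD i ' ' = '1' then 1 else 0)) acc := by
  induction ps with
  | nil => intro acc _; rfl
  | cons q t ih =>
    intro acc h
    simp only [List.foldl_cons]
    rw [h q (by simp)]
    exact ih _ (fun r hr => h r (by simp [hr]))

theorem getD_set_ne' (a : List Char) (c : Char) {p q : Nat} (h : q ≠ p) :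
    (a.set p c).getD q ' ' = a.getD q ' ' := by
  simp [List.getD, List.getElem?_set_ne (by omega : p ≠ q)]

theorem readv_set_of_ne (a : List Char) (c : Char) (ps : List Nat) (p : Nat)
    (h : ∀ q ∈ ps, q ≠ p) : readv (a.set p c) ps = readv a ps :=
  readv_from_congr _ _ _ _ (fun q hq => getD_set_ne' a c (h q hq))

theorem fmod_two_mul (k : Int) : PySem.Int.mod (2 * k) 2 = 0 := by
  simp [PySem.Int.mod, Int.fmod_eq_emod, Int.mul_emod_right]

theorem fdiv_two_mul (k : Int) : PySem.Int.floordiv (2 * k) 2 = k := by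
  simp [PySem.Int.floordiv, Int.fdiv_eq_ediv]

theorem fmod_two_mul_add_one (k : Int) : PySem.Int.mod (2 * k + 1) 2 = 1 := by
  simp [PySem.Int.mod, Int.fmod_eq_emod]

theorem fdiv_two_mul_add_one (k : Int) : PySem.Int.floordiv (2 * k + 1) 2 = k := by
  simp [PySem.Int.floordiv, Int.fdiv_eq_ediv]; omega

theorem wb_cons (a : List Char) (w : Int) (p : Nat) (ps : List Nat) :
    wb a w (p :: ps) = wb (a.set p (if PySem.Int.mod w 2 = 1 then '1' else '0'))
      (PySem.Int.floordiv w 2) ps := rfl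

theorem wb_readv_self (ps : List Nat) : ∀ a : List Char,
    (∀ q ∈ ps, q < a.length ∧ (a.getD q ' ' = '0' ∨ a.getD q ' ' = '1')) →
    wb a (readv a ps) ps.reverse = a := by
  induction ps using List.reverseRecOn with
  | nil => intro a _; rfl
  | append_singleton ts q ih =>
    intro a h
    have hq := h q (by simp)
    have hts : ∀ r ∈ ts, r < a.length ∧ (a.getD r ' ' = '0' ∨ a.getD r ' ' = '1') :=
      fun r hr => h r (by simp [hr])
    rw [List.reverse_append, List.reverse_singleton, List.singleton_append,
      readv_append_singleton, wb_cons]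
    rcases hq.2 with h0 | h1
    · have hb : (if a.getD q ' ' = '1' then (1:Int) else 0) = 0 := by rw [h0]; decide
      rw [hb, add_zero, fmod_two_mul, fdiv_two_mul]
      rw [if_neg (by decide)]
      have hset : a.set q '0' = a := by
        have : a.getD q ' ' = a[q]'hq.1 := List.getD_eq_getElem a ' ' hq.1
        rw [← h0, this] at *
        exact List.set_getElem_self hq.1
      rw [hset]
      exact ih a hts
    · have hb : (if a.getD q ' ' = '1' then (1:Int) else 0) = 1 := by rw [h1]; decide
      rw [hb, fmod_two_mul_add_one, fdiv_two_mul_add_one]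
      rw [if_pos rfl]
      have hset : a.set q '1' = a := by
        have hg : a.getD q ' ' = a[q]'hq.1 := List.getD_eq_getElem a ' ' hq.1
        rw [hg] at h1
        rw [← h1]
        exact List.set_getElem_self hq.1
      rw [hset]
      exact ih a hts

theorem loopA_eq (m : List Char) : ∀ e a,
    (∀ p ∈ poss m e, p < a.length ∧ (a.getD p ' ' = '0' ∨ a.getD p ' ' = '1')) →
    loopA m a e = Bres a (poss m e) := by
  intro e
  induction e using Nat.strong_induction_on with
  | _ e ih =>
    intro a h
    rw [loopA]
    cases hr : rfind1 m e with
    | none =>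
      rw [rfind1_none_poss hr]
      simp [Bres, readv]
    | some p =>
      have hposs := rfind1_some_poss hr
      have hp : p ∈ poss m e := by rw [hposs]; simp
      have hpa := h p hp
      have hlt := rfind1_lt m hr
      have hqs : ∀ q ∈ poss m p, q ≠ p := by
        intro q hq; have := (mem_poss.mp hq).1; omega
      have hn : (poss m e).length = (poss m p).length + 1 := by rw [hposs]; simp
      have hv : readv a (poss m e)
          = 2 * readv a (poss m p) + (if a.getD p ' ' = '1' then 1 else 0) := by
        rw [hposs, readv_append_singleton]
      simp only []
      rcases hpa.2 with h0 | h1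
      · -- char '0': set to '1' and stop
        have hb : (if a.getD p ' ' = '1' then (1:Int) else 0) = 0 := by rw [h0]; decide
        rw [if_neg (by rw [h0]; decide)]
        have hveq : readv a (poss m e) = 2 * readv a (poss m p) := by
          rw [hv, hb, add_zero]
        unfold Bres
        rw [if_neg (by
          rw [hveq, hn, pow_succ]
          intro hcontra
          have h2 : (0:Int) < 2 ^ (poss m p).length := by positivity
          omega)]
        rw [hposs, List.reverse_append, List.reverse_singleton, List.singleton_append, wb_cons]
        rw [readv_append_singleton, hb, add_zero]
        rw [if_pos (by rw [fmod_two_mul_add_one])]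
        rw [fdiv_two_mul_add_one]
        have hset : readv (a.set p '1') (poss m p) = readv a (poss m p) :=
          readv_set_of_ne a '1' (poss m p) p hqs
        rw [← hset]
        congr 1
        symm
        apply wb_readv_self
        intro q hq
        have hne := hqs q hq
        have := h q (by rw [hposs]; simp [List.mem_append]; left; exact hq)
        refine ⟨by simpa using this.1, ?_⟩
        rw [getD_set_ne' a '1' hne]
        exact this.2
      · -- char '1': carry, recurse
        have hb : (if a.getD p ' ' = '1' then (1:Int) else 0) = 1 := by rw [h1]; decide
        rw [if_pos h1]
        have hveq : readv a (poss m e) = 2 * readv a (poss m p) + 1 := by rw [hv, hb]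
        have hIH := ih p hlt (a.set p '0') (by
          intro q hq
          have hne := hqs q hq
          have hq' : q ∈ poss m e := by
            rw [hposs]; simp [List.mem_append]; left; exact hq
          have := h q hq'
          refine ⟨by simpa using this.1, ?_⟩
          rw [getD_set_ne' a '0' hne]
          exact this.2)
        rw [hIH]
        have hposs_p : readv (a.set p '0') (poss m p) = readv a (poss m p) :=
          readv_set_of_ne a '0' (poss m p) p hqs
        unfold Bres
        rw [hposs_p, hveq, hn]
        have hiff : (2 * readv a (poss m p) + 1 + 1 = 2 ^ ((poss m p).length + 1))
            ↔ (readv a (poss m p) + 1 = 2 ^ (poss m p).length) := by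
          rw [pow_succ]; omega
        by_cases hov : readv a (poss m p) + 1 = 2 ^ (poss m p).length
        · rw [if_pos hov, if_pos (hiff.mpr hov)]
        · rw [if_neg hov, if_neg (fun hc => hov (hiff.mp hc))]
          rw [hposs, List.reverse_append, List.reverse_singleton, List.singleton_append, wb_cons]
          have : (2 * readv a (poss m p) + 1 + 1) = 2 * (readv a (poss m p) + 1) := by ring
          rw [this, if_neg (by rw [fmod_two_mul]; norm_num), fdiv_two_mul]

theorem enum_filter (l : List Char) : ∀ s : Int,
    (PySem.List.enumerate l s).filterMap (fun ic => if ic.2 = '1' then some ic.1 else none)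
      = ((List.range l.length).filter (fun p => l.getD p '?' = '1')).map (fun (p : Nat) => s + (p : Int)) := by
  induction l with
  | nil => intro s; simp [PySem.List.enumerate]
  | cons c t ih =>
    intro s
    rw [PySem.List.enumerate_cons, List.length_cons, List.range_succ_eq_map, List.filter_cons]
    have hmap : ∀ L : List Nat,
        (L.map Nat.succ).map (fun (p : Nat) => s + (p : Int))
          = L.map (fun (p : Nat) => (s + 1) + (p : Int)) := by
      intro L; rw [List.map_map]; apply List.map_congr_left; intro q _
      simp [Function.comp]; ring
    by_cases hc : c = '1'
    · simp only [List.filterMap_cons, hc, List.getD_cons_zero, decide_true, List.filter_map,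
        Function.comp_def, List.getD_cons_succ, reduceIte, List.map_cons, Nat.cast_zero, add_zero,
        ih (s+1), hmap]
    · simp only [List.filterMap_cons, List.getD_cons_zero, decide_eq_true_eq, if_neg hc,
        List.filter_map, Function.comp_def, List.getD_cons_succ, ih (s+1), hmap]

theorem slice_to_clamp (m : List Char) (b : Int) :
    PySem.List.slice m none (some b) = m.take (PySem.List.clampIdx m.length b) := by
  simp [PySem.List.slice]

theorem pos_eq_poss (m : List Char) (b : Int) :
    (PySem.List.enumerate (PySem.List.slice m none (some b))).filterMap
        (fun ic => if ic.2 = '1' then some ic.1 else none)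
      = (poss m (PySem.List.clampIdx m.length b)).map (fun (p : Nat) => (p : Int)) := by
  rw [slice_to_clamp, enum_filter]
  have hle : PySem.List.clampIdx m.length b ≤ m.length := PySem.List.clampIdx_le m.length b
  have hlen : (m.take (PySem.List.clampIdx m.length b)).length = PySem.List.clampIdx m.length b := by
    simp [hle]
  rw [hlen]
  unfold poss
  have hfil : (List.range (PySem.List.clampIdx m.length b)).filter
        (fun p => (m.take (PySem.List.clampIdx m.length b)).getD p '?' = '1')
      = (List.range (PySem.List.clampIdx m.length b)).filter (fun p => m.getD p '?' = '1') := by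
    apply List.filter_congr
    intro p hp
    rw [List.mem_range] at hp
    simp [List.getD, hp,
      List.getElem?_eq_getElem (show p < m.length by omega)]
  rw [hfil]
  apply List.map_congr_left
  intro q _
  omega

theorem foldl_v_cast (a : List Char) (ns : List Nat) :
    (ns.map (fun (p : Nat) => (p : Int))).foldl
        (fun acc i => 2 * acc + (if PySem.List.pyGetD a i ' ' = '1' then 1 else 0)) 0
      = readv a ns := by
  rw [List.foldl_map]
  unfold readv
  congr 1
  funext acc p
  rw [PySem.List.pyGetD_natCast]

theorem foldl_wb_cast (a : List Char) (w : Int) (ns : List Nat) :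
    ((ns.map (fun (p : Nat) => (p : Int))).reverse.foldl
        (fun (st : List Char × Int) i =>
          (st.1.set i.toNat (if PySem.Int.mod st.2 2 = 1 then '1' else '0'),
           PySem.Int.floordiv st.2 2))
        (a, w)).1
      = wb a w ns.reverse := by
  rw [← List.map_reverse, List.foldl_map]
  unfold wb wbStep
  congr 1

theorem natBin_mem : ∀ n : Nat, ∀ c ∈ natBin n, c = '0' ∨ c = '1' := by
  intro n
  induction n using Nat.strong_induction_on with
  | _ n ih =>
    match n with
    | 0 => simp [natBin]
    | m + 1 =>
      rw [natBin]
      intro c hc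
      rcases List.mem_append.mp hc with h | h
      · exact ih ((m+1)/2) (Nat.div_lt_self (Nat.succ_pos m) (by norm_num)) c h
      · simp at h; subst h; split <;> simp

theorem natBin_len : ∀ (n k : Nat), n < 2 ^ k → (natBin n).length ≤ k := by
  intro n
  induction n using Nat.strong_induction_on with
  | _ n ih =>
    match n with
    | 0 => intro k _; simp [natBin]
    | m + 1 =>
      intro k hk
      rw [natBin]
      have hk1 : 1 ≤ k := by
        by_contra hcon
        interval_cases k
        omega
      have hdiv : (m + 1) / 2 < 2 ^ (k - 1) := by
        have h2 : 2 ^ k = 2 * 2 ^ (k - 1) := by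
          conv_lhs => rw [show k = (k - 1) + 1 by omega]
          ring
        omega
      have := ih ((m+1)/2) (Nat.div_lt_self (Nat.succ_pos m) (by norm_num)) (k - 1) hdiv
      simp only [List.length_append, List.length_cons, List.length_nil]
      omega

theorem fmtDigits_len {n k : Nat} (hk : 1 ≤ k) (h : n < 2 ^ k) : (fmtDigits n).length ≤ k := by
  unfold fmtDigits
  split
  · simpa using hk
  · exact natBin_len n k h

theorem fmtDigits_mem {n : Nat} : ∀ c ∈ fmtDigits n, c = '0' ∨ c = '1' := by
  unfold fmtDigits
  split
  · simp
  · exact natBin_mem n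

theorem pad36_length {addr : Int} (h1 : -2147483648 ≤ addr) (h2 : addr ≤ 2147483648) :
    (pad36 addr).length = 36 := by
  unfold pad36
  have hlt : addr.natAbs < 2 ^ 32 := by omega
  split
  · have hl := fmtDigits_len (n := addr.natAbs) (k := 32) (by norm_num) hlt
    simp only [List.length_cons, List.length_append, List.length_replicate]
    omega
  · have hl := fmtDigits_len (n := addr.natAbs) (k := 32) (by norm_num) hlt
    simp only [List.length_append, List.length_replicate]
    omega

theorem pad36_bin {addr : Int} (h1 : -2147483648 ≤ addr) (h2 : addr ≤ 2147483648)
    {p : Nat} (hp : p < 36) (hs : addr < 0 → p ≠ 0) :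
    (pad36 addr).getD p ' ' = '0' ∨ (pad36 addr).getD p ' ' = '1' := by
  have hlen : (pad36 addr).length = 36 := pad36_length h1 h2
  have hplen : p < (pad36 addr).length := by omega
  have hmem : (pad36 addr).getD p ' ' ∈ pad36 addr := by
    rw [List.getD_eq_getElem _ _ hplen]
    exact List.getElem_mem hplen
  unfold pad36 at hmem ⊢
  split at hmem
  case isTrue hneg =>
    rw [if_pos hneg] at *
    -- p ≠ 0, so the element is in the tail
    obtain ⟨q, rfl⟩ : ∃ q, p = q + 1 := ⟨p - 1, by have := hs hneg; omega⟩
    simp only [List.getD_cons_succ]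
    have hq : q < (List.replicate (35 - (fmtDigits addr.natAbs).length) '0' ++ fmtDigits addr.natAbs).length := by
      have : (pad36 addr).length = 36 := hlen
      unfold pad36 at this
      rw [if_pos hneg] at this
      simp only [List.length_cons] at this
      omega
    have hmem' : (List.replicate (35 - (fmtDigits addr.natAbs).length) '0' ++ fmtDigits addr.natAbs).getD q ' '
        ∈ (List.replicate (35 - (fmtDigits addr.natAbs).length) '0' ++ fmtDigits addr.natAbs) := by
      rw [List.getD_eq_getElem _ _ hq]
      exact List.getElem_mem hq
    rcases List.mem_append.mp hmem' with h | h
    · left; exact List.eq_of_mem_replicate h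
    · exact fmtDigits_mem _ h
  case isFalse hneg =>
    rw [if_neg hneg] at *
    rcases List.mem_append.mp hmem with h | h
    · left; exact List.eq_of_mem_replicate h
    · exact fmtDigits_mem _ h

theorem alt_eq_Bres (addr : Int) (mask : String) (bits : Int) :
    increment_by_mask_alt addr mask bits
      = Bres (pad36 addr) (poss mask.toList (PySem.List.clampIdx mask.toList.length bits)) := by
  unfold increment_by_mask_alt Bres
  simp only [pos_eq_poss, foldl_v_cast, foldl_wb_cast, List.length_map]

-- ===== VERDICT (by name: the statement is the Claim_ definition above) =====
theorem increment_by_mask_spec : Claim_equal_increment_by_mask := by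
  intro addr mask bits hdom hpre
  unfold Spec_increment_by_mask
  have hb : Dom_increment_by_mask addr mask bits := hdom
  unfold Dom_increment_by_mask at hb
  simp only [pvDomInt, Bool.and_eq_true, decide_eq_true_eq] at hb
  obtain ⟨⟨⟨h1, h2⟩, -⟩, -⟩ := hb
  rw [alt_eq_Bres, increment_by_mask]
  apply loopA_eq
  intro p hp
  rw [mem_poss] at hp
  obtain ⟨hlt, h1p⟩ := hp
  obtain ⟨h36, hsgn⟩ := hpre p hlt h1p
  refine ⟨by rw [pad36_length h1 h2]; exact h36, pad36_bin h1 h2 h36 hsgn⟩
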